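-- pv_equiv track=rewrite | github.com/MuhammadAhsanShahbaz/Scrapy-Selenium | 2024/May/AmaAssn Medical Scraper/amaassn_medical/amaassn_medical/spiders/amaassn.py | get_employment_policies_and_benifits
-- ===== SOURCE A (Python) =====
-- def get_employment_policies_and_benifits(item, thing):
--     item['Part-time/Shared Schedule Positions'] = False
--     item['On-site Child Care'] = False
--     item['Subsidized Child Care'] = False
--     item['Moving Allowance'] = False
--     item['Housing Stipend'] = False
--     item['Free Parking'] = False
--     item['On-call Meal Allowance'] = False
--     item['Technology Allowance '] = False
--     item['Placement Assistance'] = False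
--     item['Policy Prohibits Hiring Smokers'] = False
--
--     temperary = thing.get('field_program_offers_2021', [])
--
--     for i in range(10):
--         try:
--             if temperary[i] == "Part-time/shared schedule positions":
--                 item['Part-time/Shared Schedule Positions'] = True
--
--             elif temperary[i] == "On-site child care":
--                 item['On-site Child Care'] = True
--
--             elif temperary[i] == "Subsidized child care":
--                 item['Subsidized Child Care'] = True
--
--             elif temperary[i] == "Moving allowance":
--                 item['Moving Allowance'] = True
--
--             elif temperary[i] == "Housing stipend":
--                 item['Housing Stipend'] = True
--
--             elif temperary[i] == "Free parking":
--                 item['Free Parking'] = True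
--
--             elif temperary[i] == "On-call meal allowance":
--                 item['On-call Meal Allowance'] = True
--
--             elif temperary[i] == "iPads, tablets, etc., or technology allowance":
--                 item['Technology Allowance '] = True
--
--             elif temperary[
--                 i] == "Placement assistance upon completion of program into practice, fellowship or academia":
--                 item['Placement Assistance'] = True
--
--             else:
--                 a = ''
--         except IndexError:
--             break
--
--     return item
-- ===== SOURCE B (Python) =====
-- def get_employment_policies_and_benifits(item, thing):
--     offered = thing.get('field_program_offers_2021', [])[:10]
--     item['Part-time/Shared Schedule Positions'] = "Part-time/shared schedule positions" in offered
--     item['On-site Child Care'] = "On-site child care" in offered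
--     item['Subsidized Child Care'] = "Subsidized child care" in offered
--     item['Moving Allowance'] = "Moving allowance" in offered
--     item['Housing Stipend'] = "Housing stipend" in offered
--     item['Free Parking'] = "Free parking" in offered
--     item['On-call Meal Allowance'] = "On-call meal allowance" in offered
--     item['Technology Allowance '] = "iPads, tablets, etc., or technology allowance" in offered
--     item['Placement Assistance'] = "Placement assistance upon completion of program into practice, fellowship or academia" in offered
--     item['Policy Prohibits Hiring Smokers'] = False
--     return item
-- ===== Notes on version B (the rewrite author's own statement) =====
-- stated objective: simpler
-- what changed: Replaces A's indexed for-range loop with try/except-IndexError break and a nine-way if/elif chain by slicing the first ten offered features and setting each flag with one independent membership test ('x in offered'); the never-matched 'Policy Prohibits Hiring Smokers' flag is just set False.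
import Mathlib
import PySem

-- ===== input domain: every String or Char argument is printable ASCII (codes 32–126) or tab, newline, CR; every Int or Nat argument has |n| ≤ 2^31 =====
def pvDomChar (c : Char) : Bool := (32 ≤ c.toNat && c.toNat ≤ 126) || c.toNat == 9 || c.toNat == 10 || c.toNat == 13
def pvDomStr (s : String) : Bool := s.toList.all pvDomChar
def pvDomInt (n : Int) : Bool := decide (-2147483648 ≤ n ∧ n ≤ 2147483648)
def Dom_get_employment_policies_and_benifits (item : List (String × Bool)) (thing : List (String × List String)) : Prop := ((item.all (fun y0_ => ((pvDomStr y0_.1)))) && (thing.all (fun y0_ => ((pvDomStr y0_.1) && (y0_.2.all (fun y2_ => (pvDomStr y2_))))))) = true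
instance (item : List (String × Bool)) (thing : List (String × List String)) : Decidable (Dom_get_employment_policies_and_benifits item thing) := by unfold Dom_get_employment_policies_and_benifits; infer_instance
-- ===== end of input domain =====

-- B replaces A's indexed try/except if/elif scan by a slice plus one independent
-- membership test per flag (objective: simpler). In Python both versions mutate
-- `item` in place, writing the same keys with the same final values; the
-- equivalence proved here is about the returned dict.

-- ===== PORT A =====
-- the if/elif chain of A's loop body, acting on the current dict state
def pvStepA (d : PySem.Dict String Bool) (x : String) : PySem.Dict String Bool :=
  if x == "Part-time/shared schedule positions" then d.insert "Part-time/Shared Schedule Positions" true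
  else if x == "On-site child care" then d.insert "On-site Child Care" true
  else if x == "Subsidized child care" then d.insert "Subsidized Child Care" true
  else if x == "Moving allowance" then d.insert "Moving Allowance" true
  else if x == "Housing stipend" then d.insert "Housing Stipend" true
  else if x == "Free parking" then d.insert "Free Parking" true
  else if x == "On-call meal allowance" then d.insert "On-call Meal Allowance" true
  else if x == "iPads, tablets, etc., or technology allowance" then d.insert "Technology Allowance " true
  else if x == "Placement assistance upon completion of program into practice, fellowship or academia" then d.insert "Placement Assistance" true
  else d   -- `a = ''` has no effect on the result

-- `for i in range(10): try: … temperary[i] … except IndexError: break`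
-- fuel counts the remaining iterations; pyGet? = none is the IndexError → break
def pvLoopA (temp : List String) : Nat → Nat → PySem.Dict String Bool → PySem.Dict String Bool
  | 0, _, d => d
  | fuel+1, i, d =>
    match PySem.List.pyGet? temp (i : Int) with
    | none => d
    | some x => pvLoopA temp fuel (i+1) (pvStepA d x)

def get_employment_policies_and_benifits (item : List (String × Bool)) (thing : List (String × List String)) : List (String × Bool) :=
  let d := ((((((((((PySem.Dict.mk item).insert "Part-time/Shared Schedule Positions" false).insert "On-site Child Care" false).insert "Subsidized Child Care" false).insert "Moving Allowance" false).insert "Housing Stipend" false).insert "Free Parking" false).insert "On-call Meal Allowance" false).insert "Technology Allowance " false).insert "Placement Assistance" false).insert "Policy Prohibits Hiring Smokers" false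
  let temperary := (PySem.Dict.mk thing).getD "field_program_offers_2021" []
  (pvLoopA temperary 10 0 d).items

-- ===== PORT B =====
def get_employment_policies_and_benifits_alt (item : List (String × Bool)) (thing : List (String × List String)) : List (String × Bool) :=
  let offered := PySem.List.slice ((PySem.Dict.mk thing).getD "field_program_offers_2021" []) none (some 10)
  (((((((((((PySem.Dict.mk item).insert "Part-time/Shared Schedule Positions" (offered.contains "Part-time/shared schedule positions")).insert "On-site Child Care" (offered.contains "On-site child care")).insert "Subsidized Child Care" (offered.contains "Subsidized child care")).insert "Moving Allowance" (offered.contains "Moving allowance")).insert "Housing Stipend" (offered.contains "Housing stipend")).insert "Free Parking" (offered.contains "Free parking")).insert "On-call Meal Allowance" (offered.contains "On-call meal allowance")).insert "Technology Allowance " (offered.contains "iPads, tablets, etc., or technology allowance")).insert "Placement Assistance" (offered.contains "Placement assistance upon completion of program into practice, fellowship or academia")).insert "Policy Prohibits Hiring Smokers" false).items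

-- ===== PRECONDITION & SPEC =====
def Spec_get_employment_policies_and_benifits (item : List (String × Bool)) (thing : List (String × List String)) (out : List (String × Bool)) : Prop := out = get_employment_policies_and_benifits_alt item thing
instance (item : List (String × Bool)) (thing : List (String × List String)) (out : List (String × Bool)) : Decidable (Spec_get_employment_policies_and_benifits item thing out) := by unfold Spec_get_employment_policies_and_benifits; infer_instance

-- ===== CLAIM (what is proved, stated in full; the proofs are below) =====
def Claim_equal_get_employment_policies_and_benifits : Prop := ∀ (item : List (String × Bool)) (thing : List (String × List String)), Dom_get_employment_policies_and_benifits item thing → Spec_get_employment_policies_and_benifits item thing (get_employment_policies_and_benifits item thing)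

-- ===== LEMMAS AND PROOFS =====

-- the common shape of both final dicts: a base dict, then the ten flag inserts
def pvRender (d : PySem.Dict String Bool) (b1 b2 b3 b4 b5 b6 b7 b8 b9 : Bool) : PySem.Dict String Bool :=
  (((((((((d.insert "Part-time/Shared Schedule Positions" b1).insert "On-site Child Care" b2).insert "Subsidized Child Care" b3).insert "Moving Allowance" b4).insert "Housing Stipend" b5).insert "Free Parking" b6).insert "On-call Meal Allowance" b7).insert "Technology Allowance " b8).insert "Placement Assistance" b9).insert "Policy Prohibits Hiring Smokers" false

def pvChain (d : PySem.Dict String Bool) (ps : List (String × Bool)) : PySem.Dict String Bool :=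
  ps.foldl (fun d p => d.insert p.1 p.2) d

-- two inserts at distinct keys commute when the overwritten key is already present
lemma pv_insert_comm_of_contains {d : PySem.Dict String Bool} {k k' : String} {v v' : Bool}
    (h : d.contains k = true) (hne : k ≠ k') :
    (d.insert k' v').insert k v = (d.insert k v).insert k' v' := by
  apply PySem.Dict.ext
  have hA : (d.insert k' v').contains k = true := by
    rw [PySem.Dict.contains_insert]; simp [h]
  by_cases hc' : d.contains k' = true
  · have hB : (d.insert k v).contains k' = true := by
      rw [PySem.Dict.contains_insert]; simp [hc']
    rw [PySem.Dict.items_insert_of_contains _ _ hA,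
        PySem.Dict.items_insert_of_contains _ _ hc',
        PySem.Dict.items_insert_of_contains _ _ hB,
        PySem.Dict.items_insert_of_contains _ _ h]
    simp only [List.map_map]
    apply List.map_congr_left
    intro p _
    simp only [Function.comp]
    by_cases h1 : p.1 = k <;> by_cases h2 : p.1 = k' <;>
      simp_all [beq_iff_eq, Ne.symm hne]
  · have hc'' : d.contains k' = false := by simpa using hc'
    have hB : (d.insert k v).contains k' = false := by
      rw [PySem.Dict.contains_insert]; simp [hc'', Ne.symm hne]
    rw [PySem.Dict.items_insert_of_contains _ _ hA,
        PySem.Dict.items_insert_of_not_contains _ _ hc'',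
        PySem.Dict.items_insert_of_not_contains _ _ hB,
        PySem.Dict.items_insert_of_contains _ _ h]
    simp [Ne.symm hne]

-- an insert of a key already present in the base commutes with a chain of
-- inserts at other keys
lemma pv_chain_comm (ps : List (String × Bool)) :
    ∀ (d : PySem.Dict String Bool) (k : String) (v : Bool),
      d.contains k = true → (∀ p ∈ ps, p.1 ≠ k) →
      (pvChain d ps).insert k v = pvChain (d.insert k v) ps := by
  induction ps with
  | nil => intro d k v _ _; rfl
  | cons p ps ih =>
    intro d k v h hps
    have hne : p.1 ≠ k := hps p (by simp)
    have h' : (d.insert p.1 p.2).contains k = true := by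
      rw [PySem.Dict.contains_insert]; simp [h]
    calc (pvChain (d.insert p.1 p.2) ps).insert k v
        = pvChain ((d.insert p.1 p.2).insert k v) ps :=
          ih _ _ _ h' (fun q hq => hps q (by simp [hq]))
      _ = pvChain ((d.insert k v).insert p.1 p.2) ps := by
          rw [pv_insert_comm_of_contains h (Ne.symm hne)]

lemma pv_absorb1 (d : PySem.Dict String Bool) (b1 b2 b3 b4 b5 b6 b7 b8 b9 : Bool) :
    (pvRender d b1 b2 b3 b4 b5 b6 b7 b8 b9).insert "Part-time/Shared Schedule Positions" true = pvRender d true b2 b3 b4 b5 b6 b7 b8 b9 := by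
  have h1 : pvRender d b1 b2 b3 b4 b5 b6 b7 b8 b9 = pvChain (d.insert "Part-time/Shared Schedule Positions" b1) [("On-site Child Care", b2), ("Subsidized Child Care", b3), ("Moving Allowance", b4), ("Housing Stipend", b5), ("Free Parking", b6), ("On-call Meal Allowance", b7), ("Technology Allowance ", b8), ("Placement Assistance", b9), ("Policy Prohibits Hiring Smokers", false)] := by
    simp only [pvRender, pvChain, List.foldl]
  have h2 : pvRender d true b2 b3 b4 b5 b6 b7 b8 b9 = pvChain (d.insert "Part-time/Shared Schedule Positions" true) [("On-site Child Care", b2), ("Subsidized Child Care", b3), ("Moving Allowance", b4), ("Housing Stipend", b5), ("Free Parking", b6), ("On-call Meal Allowance", b7), ("Technology Allowance ", b8), ("Placement Assistance", b9), ("Policy Prohibits Hiring Smokers", false)] := by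
    simp only [pvRender, pvChain, List.foldl]
  rw [h1, h2, pv_chain_comm _ _ _ _ (PySem.Dict.contains_insert_self _ _ _)
        (by intro p hp; fin_cases hp <;> simp),
      PySem.Dict.insert_insert_self]

lemma pv_absorb2 (d : PySem.Dict String Bool) (b1 b2 b3 b4 b5 b6 b7 b8 b9 : Bool) :
    (pvRender d b1 b2 b3 b4 b5 b6 b7 b8 b9).insert "On-site Child Care" true = pvRender d b1 true b3 b4 b5 b6 b7 b8 b9 := by
  have h1 : pvRender d b1 b2 b3 b4 b5 b6 b7 b8 b9 = pvChain ((d.insert "Part-time/Shared Schedule Positions" b1).insert "On-site Child Care" b2) [("Subsidized Child Care", b3), ("Moving Allowance", b4), ("Housing Stipend", b5), ("Free Parking", b6), ("On-call Meal Allowance", b7), ("Technology Allowance ", b8), ("Placement Assistance", b9), ("Policy Prohibits Hiring Smokers", false)] := by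
    simp only [pvRender, pvChain, List.foldl]
  have h2 : pvRender d b1 true b3 b4 b5 b6 b7 b8 b9 = pvChain ((d.insert "Part-time/Shared Schedule Positions" b1).insert "On-site Child Care" true) [("Subsidized Child Care", b3), ("Moving Allowance", b4), ("Housing Stipend", b5), ("Free Parking", b6), ("On-call Meal Allowance", b7), ("Technology Allowance ", b8), ("Placement Assistance", b9), ("Policy Prohibits Hiring Smokers", false)] := by
    simp only [pvRender, pvChain, List.foldl]
  rw [h1, h2, pv_chain_comm _ _ _ _ (PySem.Dict.contains_insert_self _ _ _)
        (by intro p hp; fin_cases hp <;> simp),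
      PySem.Dict.insert_insert_self]

lemma pv_absorb3 (d : PySem.Dict String Bool) (b1 b2 b3 b4 b5 b6 b7 b8 b9 : Bool) :
    (pvRender d b1 b2 b3 b4 b5 b6 b7 b8 b9).insert "Subsidized Child Care" true = pvRender d b1 b2 true b4 b5 b6 b7 b8 b9 := by
  have h1 : pvRender d b1 b2 b3 b4 b5 b6 b7 b8 b9 = pvChain (((d.insert "Part-time/Shared Schedule Positions" b1).insert "On-site Child Care" b2).insert "Subsidized Child Care" b3) [("Moving Allowance", b4), ("Housing Stipend", b5), ("Free Parking", b6), ("On-call Meal Allowance", b7), ("Technology Allowance ", b8), ("Placement Assistance", b9), ("Policy Prohibits Hiring Smokers", false)] := by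
    simp only [pvRender, pvChain, List.foldl]
  have h2 : pvRender d b1 b2 true b4 b5 b6 b7 b8 b9 = pvChain (((d.insert "Part-time/Shared Schedule Positions" b1).insert "On-site Child Care" b2).insert "Subsidized Child Care" true) [("Moving Allowance", b4), ("Housing Stipend", b5), ("Free Parking", b6), ("On-call Meal Allowance", b7), ("Technology Allowance ", b8), ("Placement Assistance", b9), ("Policy Prohibits Hiring Smokers", false)] := by
    simp only [pvRender, pvChain, List.foldl]
  rw [h1, h2, pv_chain_comm _ _ _ _ (PySem.Dict.contains_insert_self _ _ _)
        (by intro p hp; fin_cases hp <;> simp),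
      PySem.Dict.insert_insert_self]

lemma pv_absorb4 (d : PySem.Dict String Bool) (b1 b2 b3 b4 b5 b6 b7 b8 b9 : Bool) :
    (pvRender d b1 b2 b3 b4 b5 b6 b7 b8 b9).insert "Moving Allowance" true = pvRender d b1 b2 b3 true b5 b6 b7 b8 b9 := by
  have h1 : pvRender d b1 b2 b3 b4 b5 b6 b7 b8 b9 = pvChain ((((d.insert "Part-time/Shared Schedule Positions" b1).insert "On-site Child Care" b2).insert "Subsidized Child Care" b3).insert "Moving Allowance" b4) [("Housing Stipend", b5), ("Free Parking", b6), ("On-call Meal Allowance", b7), ("Technology Allowance ", b8), ("Placement Assistance", b9), ("Policy Prohibits Hiring Smokers", false)] := by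
    simp only [pvRender, pvChain, List.foldl]
  have h2 : pvRender d b1 b2 b3 true b5 b6 b7 b8 b9 = pvChain ((((d.insert "Part-time/Shared Schedule Positions" b1).insert "On-site Child Care" b2).insert "Subsidized Child Care" b3).insert "Moving Allowance" true) [("Housing Stipend", b5), ("Free Parking", b6), ("On-call Meal Allowance", b7), ("Technology Allowance ", b8), ("Placement Assistance", b9), ("Policy Prohibits Hiring Smokers", false)] := by
    simp only [pvRender, pvChain, List.foldl]
  rw [h1, h2, pv_chain_comm _ _ _ _ (PySem.Dict.contains_insert_self _ _ _)
        (by intro p hp; fin_cases hp <;> simp),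
      PySem.Dict.insert_insert_self]

lemma pv_absorb5 (d : PySem.Dict String Bool) (b1 b2 b3 b4 b5 b6 b7 b8 b9 : Bool) :
    (pvRender d b1 b2 b3 b4 b5 b6 b7 b8 b9).insert "Housing Stipend" true = pvRender d b1 b2 b3 b4 true b6 b7 b8 b9 := by
  have h1 : pvRender d b1 b2 b3 b4 b5 b6 b7 b8 b9 = pvChain (((((d.insert "Part-time/Shared Schedule Positions" b1).insert "On-site Child Care" b2).insert "Subsidized Child Care" b3).insert "Moving Allowance" b4).insert "Housing Stipend" b5) [("Free Parking", b6), ("On-call Meal Allowance", b7), ("Technology Allowance ", b8), ("Placement Assistance", b9), ("Policy Prohibits Hiring Smokers", false)] := by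
    simp only [pvRender, pvChain, List.foldl]
  have h2 : pvRender d b1 b2 b3 b4 true b6 b7 b8 b9 = pvChain (((((d.insert "Part-time/Shared Schedule Positions" b1).insert "On-site Child Care" b2).insert "Subsidized Child Care" b3).insert "Moving Allowance" b4).insert "Housing Stipend" true) [("Free Parking", b6), ("On-call Meal Allowance", b7), ("Technology Allowance ", b8), ("Placement Assistance", b9), ("Policy Prohibits Hiring Smokers", false)] := by
    simp only [pvRender, pvChain, List.foldl]
  rw [h1, h2, pv_chain_comm _ _ _ _ (PySem.Dict.contains_insert_self _ _ _)
        (by intro p hp; fin_cases hp <;> simp),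
      PySem.Dict.insert_insert_self]

lemma pv_absorb6 (d : PySem.Dict String Bool) (b1 b2 b3 b4 b5 b6 b7 b8 b9 : Bool) :
    (pvRender d b1 b2 b3 b4 b5 b6 b7 b8 b9).insert "Free Parking" true = pvRender d b1 b2 b3 b4 b5 true b7 b8 b9 := by
  have h1 : pvRender d b1 b2 b3 b4 b5 b6 b7 b8 b9 = pvChain ((((((d.insert "Part-time/Shared Schedule Positions" b1).insert "On-site Child Care" b2).insert "Subsidized Child Care" b3).insert "Moving Allowance" b4).insert "Housing Stipend" b5).insert "Free Parking" b6) [("On-call Meal Allowance", b7), ("Technology Allowance ", b8), ("Placement Assistance", b9), ("Policy Prohibits Hiring Smokers", false)] := by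
    simp only [pvRender, pvChain, List.foldl]
  have h2 : pvRender d b1 b2 b3 b4 b5 true b7 b8 b9 = pvChain ((((((d.insert "Part-time/Shared Schedule Positions" b1).insert "On-site Child Care" b2).insert "Subsidized Child Care" b3).insert "Moving Allowance" b4).insert "Housing Stipend" b5).insert "Free Parking" true) [("On-call Meal Allowance", b7), ("Technology Allowance ", b8), ("Placement Assistance", b9), ("Policy Prohibits Hiring Smokers", false)] := by
    simp only [pvRender, pvChain, List.foldl]
  rw [h1, h2, pv_chain_comm _ _ _ _ (PySem.Dict.contains_insert_self _ _ _)
        (by intro p hp; fin_cases hp <;> simp),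
      PySem.Dict.insert_insert_self]

lemma pv_absorb7 (d : PySem.Dict String Bool) (b1 b2 b3 b4 b5 b6 b7 b8 b9 : Bool) :
    (pvRender d b1 b2 b3 b4 b5 b6 b7 b8 b9).insert "On-call Meal Allowance" true = pvRender d b1 b2 b3 b4 b5 b6 true b8 b9 := by
  have h1 : pvRender d b1 b2 b3 b4 b5 b6 b7 b8 b9 = pvChain (((((((d.insert "Part-time/Shared Schedule Positions" b1).insert "On-site Child Care" b2).insert "Subsidized Child Care" b3).insert "Moving Allowance" b4).insert "Housing Stipend" b5).insert "Free Parking" b6).insert "On-call Meal Allowance" b7) [("Technology Allowance ", b8), ("Placement Assistance", b9), ("Policy Prohibits Hiring Smokers", false)] := by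
    simp only [pvRender, pvChain, List.foldl]
  have h2 : pvRender d b1 b2 b3 b4 b5 b6 true b8 b9 = pvChain (((((((d.insert "Part-time/Shared Schedule Positions" b1).insert "On-site Child Care" b2).insert "Subsidized Child Care" b3).insert "Moving Allowance" b4).insert "Housing Stipend" b5).insert "Free Parking" b6).insert "On-call Meal Allowance" true) [("Technology Allowance ", b8), ("Placement Assistance", b9), ("Policy Prohibits Hiring Smokers", false)] := by
    simp only [pvRender, pvChain, List.foldl]
  rw [h1, h2, pv_chain_comm _ _ _ _ (PySem.Dict.contains_insert_self _ _ _)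
        (by intro p hp; fin_cases hp <;> simp),
      PySem.Dict.insert_insert_self]

lemma pv_absorb8 (d : PySem.Dict String Bool) (b1 b2 b3 b4 b5 b6 b7 b8 b9 : Bool) :
    (pvRender d b1 b2 b3 b4 b5 b6 b7 b8 b9).insert "Technology Allowance " true = pvRender d b1 b2 b3 b4 b5 b6 b7 true b9 := by
  have h1 : pvRender d b1 b2 b3 b4 b5 b6 b7 b8 b9 = pvChain ((((((((d.insert "Part-time/Shared Schedule Positions" b1).insert "On-site Child Care" b2).insert "Subsidized Child Care" b3).insert "Moving Allowance" b4).insert "Housing Stipend" b5).insert "Free Parking" b6).insert "On-call Meal Allowance" b7).insert "Technology Allowance " b8) [("Placement Assistance", b9), ("Policy Prohibits Hiring Smokers", false)] := by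
    simp only [pvRender, pvChain, List.foldl]
  have h2 : pvRender d b1 b2 b3 b4 b5 b6 b7 true b9 = pvChain ((((((((d.insert "Part-time/Shared Schedule Positions" b1).insert "On-site Child Care" b2).insert "Subsidized Child Care" b3).insert "Moving Allowance" b4).insert "Housing Stipend" b5).insert "Free Parking" b6).insert "On-call Meal Allowance" b7).insert "Technology Allowance " true) [("Placement Assistance", b9), ("Policy Prohibits Hiring Smokers", false)] := by
    simp only [pvRender, pvChain, List.foldl]
  rw [h1, h2, pv_chain_comm _ _ _ _ (PySem.Dict.contains_insert_self _ _ _)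
        (by intro p hp; fin_cases hp <;> simp),
      PySem.Dict.insert_insert_self]

lemma pv_absorb9 (d : PySem.Dict String Bool) (b1 b2 b3 b4 b5 b6 b7 b8 b9 : Bool) :
    (pvRender d b1 b2 b3 b4 b5 b6 b7 b8 b9).insert "Placement Assistance" true = pvRender d b1 b2 b3 b4 b5 b6 b7 b8 true := by
  have h1 : pvRender d b1 b2 b3 b4 b5 b6 b7 b8 b9 = pvChain (((((((((d.insert "Part-time/Shared Schedule Positions" b1).insert "On-site Child Care" b2).insert "Subsidized Child Care" b3).insert "Moving Allowance" b4).insert "Housing Stipend" b5).insert "Free Parking" b6).insert "On-call Meal Allowance" b7).insert "Technology Allowance " b8).insert "Placement Assistance" b9) [("Policy Prohibits Hiring Smokers", false)] := by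
    simp only [pvRender, pvChain, List.foldl]
  have h2 : pvRender d b1 b2 b3 b4 b5 b6 b7 b8 true = pvChain (((((((((d.insert "Part-time/Shared Schedule Positions" b1).insert "On-site Child Care" b2).insert "Subsidized Child Care" b3).insert "Moving Allowance" b4).insert "Housing Stipend" b5).insert "Free Parking" b6).insert "On-call Meal Allowance" b7).insert "Technology Allowance " b8).insert "Placement Assistance" true) [("Policy Prohibits Hiring Smokers", false)] := by
    simp only [pvRender, pvChain, List.foldl]
  rw [h1, h2, pv_chain_comm _ _ _ _ (PySem.Dict.contains_insert_self _ _ _)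
        (by intro p hp; fin_cases hp <;> simp),
      PySem.Dict.insert_insert_self]

-- A's loop, started on a rendered state, ors each flag with a membership test
-- over the window of at most `fuel` elements it still scans
lemma pv_loopA_render (temp : List String) :
    ∀ (fuel i : Nat) (d : PySem.Dict String Bool) (b1 b2 b3 b4 b5 b6 b7 b8 b9 : Bool),
      pvLoopA temp fuel i (pvRender d b1 b2 b3 b4 b5 b6 b7 b8 b9) =
      pvRender d
        (b1 || ((temp.drop i).take fuel).contains "Part-time/shared schedule positions")
        (b2 || ((temp.drop i).take fuel).contains "On-site child care")
        (b3 || ((temp.drop i).take fuel).contains "Subsidized child care")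
        (b4 || ((temp.drop i).take fuel).contains "Moving allowance")
        (b5 || ((temp.drop i).take fuel).contains "Housing stipend")
        (b6 || ((temp.drop i).take fuel).contains "Free parking")
        (b7 || ((temp.drop i).take fuel).contains "On-call meal allowance")
        (b8 || ((temp.drop i).take fuel).contains "iPads, tablets, etc., or technology allowance")
        (b9 || ((temp.drop i).take fuel).contains "Placement assistance upon completion of program into practice, fellowship or academia") := by
  intro fuel
  induction fuel with
  | zero =>
    intro i d b1 b2 b3 b4 b5 b6 b7 b8 b9
    simp [pvLoopA]
  | succ fuel ih =>
    intro i d b1 b2 b3 b4 b5 b6 b7 b8 b9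
    rcases hx : PySem.List.pyGet? temp (i : Int) with _ | x
    · have hlen : temp.length ≤ i := by
        rw [PySem.List.pyGet?_natCast] at hx
        exact List.getElem?_eq_none_iff.mp hx
      have hdrop : temp.drop i = [] := List.drop_eq_nil_of_le hlen
      simp [pvLoopA, hx, hdrop]
    · have hx' : temp[i]? = some x := by rw [← PySem.List.pyGet?_natCast]; exact hx
      obtain ⟨hi, hxe⟩ := List.getElem?_eq_some_iff.mp hx'
      have hwin : (temp.drop i).take (fuel+1) = x :: ((temp.drop (i+1)).take fuel) := by
        rw [List.drop_eq_getElem_cons hi, hxe, List.take_succ_cons]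
      simp only [pvLoopA, hx]
      unfold pvStepA
      split_ifs with h1 h2 h3 h4 h5 h6 h7 h8 h9
      · have hxe2 : x = "Part-time/shared schedule positions" := by simpa using h1
        subst hxe2
        rw [pv_absorb1, ih, hwin]
        simp
      · have hxe2 : x = "On-site child care" := by simpa using h2
        subst hxe2
        rw [pv_absorb2, ih, hwin]
        simp
      · have hxe2 : x = "Subsidized child care" := by simpa using h3
        subst hxe2
        rw [pv_absorb3, ih, hwin]
        simp
      · have hxe2 : x = "Moving allowance" := by simpa using h4
        subst hxe2
        rw [pv_absorb4, ih, hwin]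
        simp
      · have hxe2 : x = "Housing stipend" := by simpa using h5
        subst hxe2
        rw [pv_absorb5, ih, hwin]
        simp
      · have hxe2 : x = "Free parking" := by simpa using h6
        subst hxe2
        rw [pv_absorb6, ih, hwin]
        simp
      · have hxe2 : x = "On-call meal allowance" := by simpa using h7
        subst hxe2
        rw [pv_absorb7, ih, hwin]
        simp
      · have hxe2 : x = "iPads, tablets, etc., or technology allowance" := by simpa using h8
        subst hxe2
        rw [pv_absorb8, ih, hwin]
        simp
      · have hxe2 : x = "Placement assistance upon completion of program into practice, fellowship or academia" := by simpa using h9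
        subst hxe2
        rw [pv_absorb9, ih, hwin]
        simp
      · rw [ih, hwin]
        have g1 : decide ("Part-time/shared schedule positions" = x) = false :=
          decide_eq_false (fun he => h1 (by simp [← he]))
        have g2 : decide ("On-site child care" = x) = false :=
          decide_eq_false (fun he => h2 (by simp [← he]))
        have g3 : decide ("Subsidized child care" = x) = false :=
          decide_eq_false (fun he => h3 (by simp [← he]))
        have g4 : decide ("Moving allowance" = x) = false :=
          decide_eq_false (fun he => h4 (by simp [← he]))
        have g5 : decide ("Housing stipend" = x) = false :=
          decide_eq_false (fun he => h5 (by simp [← he]))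
        have g6 : decide ("Free parking" = x) = false :=
          decide_eq_false (fun he => h6 (by simp [← he]))
        have g7 : decide ("On-call meal allowance" = x) = false :=
          decide_eq_false (fun he => h7 (by simp [← he]))
        have g8 : decide ("iPads, tablets, etc., or technology allowance" = x) = false :=
          decide_eq_false (fun he => h8 (by simp [← he]))
        have g9 : decide ("Placement assistance upon completion of program into practice, fellowship or academia" = x) = false :=
          decide_eq_false (fun he => h9 (by simp [← he]))
        simp [g1, g2, g3, g4, g5, g6, g7, g8, g9]

-- both returned item lists, for an explicit feature list `temp`
lemma pv_main (item : List (String × Bool)) (temp : List String) :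
    (pvLoopA temp 10 0 (((((((((((PySem.Dict.mk item).insert "Part-time/Shared Schedule Positions" false).insert "On-site Child Care" false).insert "Subsidized Child Care" false).insert "Moving Allowance" false).insert "Housing Stipend" false).insert "Free Parking" false).insert "On-call Meal Allowance" false).insert "Technology Allowance " false).insert "Placement Assistance" false).insert "Policy Prohibits Hiring Smokers" false)).items =
    (((((((((((PySem.Dict.mk item).insert "Part-time/Shared Schedule Positions" ((PySem.List.slice temp none (some 10)).contains "Part-time/shared schedule positions")).insert "On-site Child Care" ((PySem.List.slice temp none (some 10)).contains "On-site child care")).insert "Subsidized Child Care" ((PySem.List.slice temp none (some 10)).contains "Subsidized child care")).insert "Moving Allowance" ((PySem.List.slice temp none (some 10)).contains "Moving allowance")).insert "Housing Stipend" ((PySem.List.slice temp none (some 10)).contains "Housing stipend")).insert "Free Parking" ((PySem.List.slice temp none (some 10)).contains "Free parking")).insert "On-call Meal Allowance" ((PySem.List.slice temp none (some 10)).contains "On-call meal allowance")).insert "Technology Allowance " ((PySem.List.slice temp none (some 10)).contains "iPads, tablets, etc., or technology allowance")).insert "Placement Assistance" ((PySem.List.slice temp none (some 10)).contains "Placement assistance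 upon completion of program into practice, fellowship or academia")).insert "Policy Prohibits Hiring Smokers" false).items := by
  have hA : pvRender (PySem.Dict.mk item) false false false false false false false false false
      = ((((((((((PySem.Dict.mk item).insert "Part-time/Shared Schedule Positions" false).insert "On-site Child Care" false).insert "Subsidized Child Care" false).insert "Moving Allowance" false).insert "Housing Stipend" false).insert "Free Parking" false).insert "On-call Meal Allowance" false).insert "Technology Allowance " false).insert "Placement Assistance" false).insert "Policy Prohibits Hiring Smokers" false := by
    simp only [pvRender]
  have hB : pvRender (PySem.Dict.mk item)
        ((PySem.List.slice temp none (some 10)).contains "Part-time/shared schedule positions")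
        ((PySem.List.slice temp none (some 10)).contains "On-site child care")
        ((PySem.List.slice temp none (some 10)).contains "Subsidized child care")
        ((PySem.List.slice temp none (some 10)).contains "Moving allowance")
        ((PySem.List.slice temp none (some 10)).contains "Housing stipend")
        ((PySem.List.slice temp none (some 10)).contains "Free parking")
        ((PySem.List.slice temp none (some 10)).contains "On-call meal allowance")
        ((PySem.List.slice temp none (some 10)).contains "iPads, tablets, etc., or technology allowance")
        ((PySem.List.slice temp none (some 10)).contains "Placement assistance upon completion of program into practice, fellowship or academia")
      = ((((((((((PySem.Dict.mk item).insert "Part-time/Shared Schedule Positions" ((PySem.List.slice temp none (some 10)).contains "Part-time/shared schedule positions")).insert "On-site Child Care" ((PySem.List.slice temp none (some 10)).contains "On-site child care")).insert "Subsidized Child Care" ((PySem.List.slice temp none (some 10)).contains "Subsidized child care")).insert "Moving Allowance" ((PySem.List.slice temp none (some 10)).contains "Moving allowance")).insert "Housing Stipend" ((PySem.List.slice temp none (some 10)).contains "Housing stipend")).insert "Free Parking" ((PySem.List.slice temp none (some 10)).contains "Free parking")).insert "On-call Meal Allowance" ((PySem.List.slice temp none (some 10)).contains "On-call meal allowance")).insert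 "Technology Allowance " ((PySem.List.slice temp none (some 10)).contains "iPads, tablets, etc., or technology allowance")).insert "Placement Assistance" ((PySem.List.slice temp none (some 10)).contains "Placement assistance upon completion of program into practice, fellowship or academia")).insert "Policy Prohibits Hiring Smokers" false := by
    simp only [pvRender]
  have hs : PySem.List.slice temp none (some (10:Int)) = temp.take (10:Int).toNat :=
    PySem.List.slice_to temp (by norm_num)
  rw [← hA, ← hB, pv_loopA_render]
  simp [hs]

-- ===== VERDICT (by name: the statement is the Claim_ definition above) =====
theorem get_employment_policies_and_benifits_spec : Claim_equal_get_employment_policies_and_benifits := by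
  intro item thing _
  unfold Spec_get_employment_policies_and_benifits
  unfold get_employment_policies_and_benifits get_employment_policies_and_benifits_alt
  exact pv_main item ((PySem.Dict.mk thing).getD "field_program_offers_2021" [])
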